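-- pv_equiv track=rewrite | github.com/iglabari/ClaraFold | ClaraFold.py | fix_pairing_issues
-- ===== SOURCE A (Python) =====
-- def fix_pairing_issues(structure):
--     """
--     Corrige problemas de emparejamiento en la estructura.
--     Asegura que todos los paréntesis y pseudonudos estén correctamente emparejados.
--
--     Args:
--         structure (str): Estructura a verificar y corregir
--
--     Returns:
--         str: Estructura corregida
--     """
--     # Manejar pares regulares
--     result = list(structure)
--
--     # Verificar pares regulares
--     regular_stack = []
--     for i, char in enumerate(structure):
--         if char == '(':
--             regular_stack.append(i)
--         elif char == ')':
--             if regular_stack: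
--                 regular_stack.pop()
--             else:
--                 result[i] = '.'  # Cerrar sin abrir
--
--     for pos in regular_stack:
--         result[pos] = '.'  # Abrir sin cerrar
--
--     # Verificar pseudonudos
--     pk_stack = []
--     for i, char in enumerate(''.join(result)):
--         if char == '<':
--             pk_stack.append(i)
--         elif char == '>':
--             if pk_stack:
--                 pk_stack.pop()
--             else:
--                 result[i] = '.'  # Cerrar sin abrir
--
--     for pos in pk_stack:
--         result[pos] = '.'  # Abrir sin cerrar
--
--     return ''.join(result)
-- ===== SOURCE B (Python) =====
-- def _fix_family(chars, opener, closer):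
--     res = list(chars)
--     # forward pass: balance counter; dot closers that have no matching opener
--     bal = 0
--     for i, ch in enumerate(chars):
--         if ch == opener:
--             bal += 1
--         elif ch == closer:
--             if bal > 0:
--                 bal -= 1
--             else:
--                 res[i] = '.'
--     # backward pass: closers count as openers; dot openers with no closer to their right
--     bal = 0
--     for i, ch in reversed(list(enumerate(chars))):
--         if ch == closer:
--             bal += 1
--         elif ch == opener:
--             if bal > 0:
--                 bal -= 1
--             else:
--                 res[i] = '.'
--     return res
--
--
-- def fix_pairing_issues(structure):
--     res = _fix_family(list(structure), '(', ')')
--     res = _fix_family(res, '<', '>')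
--     return ''.join(res)
-- ===== Notes on version B (the rewrite author's own statement) =====
-- stated objective: alternative
-- what changed: Replaces A's index-stack plus a final stack-draining mark loop by two stack-free counter scans per bracket family: a forward balance scan dots unmatched closers and a backward balance scan (closers counted as openers) dots unmatched openers, using O(1) extra state instead of an O(n) stack.
import Mathlib
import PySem

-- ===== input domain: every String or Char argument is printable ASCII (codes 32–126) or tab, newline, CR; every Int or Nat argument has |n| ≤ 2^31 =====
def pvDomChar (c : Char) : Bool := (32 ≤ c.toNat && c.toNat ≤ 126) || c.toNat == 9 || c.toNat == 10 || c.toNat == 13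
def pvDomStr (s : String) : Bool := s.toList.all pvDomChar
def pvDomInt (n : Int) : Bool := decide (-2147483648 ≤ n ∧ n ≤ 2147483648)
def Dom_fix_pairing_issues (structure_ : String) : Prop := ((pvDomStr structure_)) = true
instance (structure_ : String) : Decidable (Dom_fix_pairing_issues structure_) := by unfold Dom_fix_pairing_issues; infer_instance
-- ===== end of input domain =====

-- B replaces A's index stacks by two balance-counter scans (forward for closers, backward for
-- openers) per bracket family; same return value, proved equal on all inputs.

-- result[i] = '.'  (index from enumerate, always in range and nonnegative)
def pvMark (res : List Char) (i : Int) : List Char := PySem.List.pySetD res i '.'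

-- ===== PORT A =====
-- one family of A's code: the enumerate loop with an index stack, then dotting leftover stack entries
def pvAStep (o c : Char) (acc : List Int × List Char) (ic : Int × Char) : List Int × List Char :=
  if ic.2 = o then (acc.1 ++ [ic.1], acc.2)
  else if ic.2 = c then
    (if acc.1 ≠ [] then (acc.1.dropLast, acc.2) else (acc.1, pvMark acc.2 ic.1))
  else acc

def pvAFamily (o c : Char) (chars : List Char) : List Char :=
  let p := (PySem.List.enumerate chars).foldl (pvAStep o c) ([], chars)
  p.1.foldl pvMark p.2

def fix_pairing_issues (structure_ : String) : String :=
  String.mk (pvAFamily '<' '>' (pvAFamily '(' ')' structure_.toList))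

-- ===== PORT B =====
def pvBFwdStep (o c : Char) (acc : Nat × List Char) (ic : Int × Char) : Nat × List Char :=
  if ic.2 = o then (acc.1 + 1, acc.2)
  else if ic.2 = c then
    (if acc.1 > 0 then (acc.1 - 1, acc.2) else (acc.1, pvMark acc.2 ic.1))
  else acc

def pvBRevStep (o c : Char) (acc : Nat × List Char) (ic : Int × Char) : Nat × List Char :=
  if ic.2 = c then (acc.1 + 1, acc.2)
  else if ic.2 = o then
    (if acc.1 > 0 then (acc.1 - 1, acc.2) else (acc.1, pvMark acc.2 ic.1))
  else acc

def pvBFamily (chars : List Char) (o c : Char) : List Char :=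
  let fwd := (PySem.List.enumerate chars).foldl (pvBFwdStep o c) (0, chars)
  let rev := ((PySem.List.enumerate chars).reverse).foldl (pvBRevStep o c) (0, fwd.2)
  rev.2

def fix_pairing_issues_alt (structure_ : String) : String :=
  String.mk (pvBFamily (pvBFamily structure_.toList '(' ')') '<' '>')

-- ===== PRECONDITION & SPEC =====
def Spec_fix_pairing_issues (structure_ : String) (out : String) : Prop := out = fix_pairing_issues_alt structure_
instance (structure_ : String) (out : String) : Decidable (Spec_fix_pairing_issues structure_ out) := by unfold Spec_fix_pairing_issues; infer_instance

-- ===== CLAIM (what is proved, stated in full; the proofs are below) =====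
def Claim_equal_fix_pairing_issues : Prop := ∀ (structure_ : String), Dom_fix_pairing_issues structure_ → Spec_fix_pairing_issues structure_ (fix_pairing_issues structure_)

-- ===== LEMMAS AND PROOFS =====

-- the stack of A's forward loop, computed on its own (pvAStep updates the stack independently of res)
def pvStk (o c : Char) (st : List Int) (l : List (Int × Char)) : List Int :=
  l.foldl (fun st ic =>
    if ic.2 = o then st ++ [ic.1]
    else if ic.2 = c then (if st ≠ [] then st.dropLast else st)
    else st) st

theorem pvMark_comm (r : List Char) (i j : Int) (hi : 0 ≤ i) (hj : 0 ≤ j) :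
    pvMark (pvMark r i) j = pvMark (pvMark r j) i := by
  simp only [pvMark, PySem.List.pySetD_of_nonneg _ _ hi, PySem.List.pySetD_of_nonneg _ _ hj]
  by_cases h : i.toNat = j.toNat
  · rw [h]
  · exact List.set_comm _ _ h

theorem foldl_mark_swap (L : List Int) :
    ∀ (r : List Char) (j : Int), (∀ i ∈ L, 0 ≤ i) → 0 ≤ j →
      L.foldl pvMark (pvMark r j) = pvMark (L.foldl pvMark r) j := by
  induction L with
  | nil => intro r j _ _; rfl
  | cons a t ih =>
      intro r j hL hj
      simp only [List.foldl_cons]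
      rw [pvMark_comm r j a hj (hL a (by simp)), ih _ j (fun i hi => hL i (by simp [hi])) hj]

theorem stkA_proj (o c : Char) (l : List (Int × Char)) :
    ∀ (st : List Int) (res : List Char),
      (l.foldl (pvAStep o c) (st, res)).1 = pvStk o c st l := by
  induction l with
  | nil => intro st res; rfl
  | cons a t ih =>
      intro st res
      simp only [List.foldl_cons, pvStk, pvAStep]
      by_cases h1 : a.2 = o
      · rw [if_pos h1, if_pos h1]; exact ih (st ++ [a.1]) res
      · by_cases h2 : a.2 = c
        · by_cases h3 : st ≠ []
          · rw [if_neg h1, if_pos h2, if_pos h3, if_neg h1, if_pos h2, if_pos h3]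
            exact ih st.dropLast res
          · rw [if_neg h1, if_pos h2, if_neg h3, if_neg h1, if_pos h2, if_neg h3]
            exact ih st (pvMark res a.1)
        · rw [if_neg h1, if_neg h2, if_neg h1, if_neg h2]; exact ih st res

theorem fwd_eq (o c : Char) (l : List (Int × Char)) :
    ∀ (st : List Int) (res : List Char),
      l.foldl (pvBFwdStep o c) (st.length, res)
        = ((l.foldl (pvAStep o c) (st, res)).1.length, (l.foldl (pvAStep o c) (st, res)).2) := by
  induction l with
  | nil => intro st res; rfl
  | cons a t ih =>
      intro st res
      simp only [List.foldl_cons, pvAStep, pvBFwdStep]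
      by_cases h1 : a.2 = o
      · rw [if_pos h1, if_pos h1]
        have : st.length + 1 = (st ++ [a.1]).length := by simp
        rw [this]; exact ih (st ++ [a.1]) res
      · by_cases h2 : a.2 = c
        · by_cases h3 : st ≠ []
          · have hlen : st.length > 0 := List.length_pos_iff.mpr h3
            rw [if_neg h1, if_pos h2, if_pos h3, if_neg h1, if_pos h2, if_pos hlen]
            have : st.length - 1 = st.dropLast.length := by simp [List.length_dropLast]
            rw [this]; exact ih st.dropLast res
          · have h3' : st = [] := by simpa using h3
            subst h3'
            rw [if_neg h1, if_pos h2, if_neg (by simp), if_neg h1, if_pos h2,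
                if_neg (by simp)]
            exact ih [] (pvMark res a.1)
        · rw [if_neg h1, if_neg h2, if_neg h1, if_neg h2]; exact ih st res

theorem stk_nonneg (o c : Char) (l : List (Int × Char)) :
    ∀ (st : List Int), (∀ i ∈ st, 0 ≤ i) → (∀ p ∈ l, 0 ≤ p.1) →
      ∀ i ∈ pvStk o c st l, 0 ≤ i := by
  induction l with
  | nil => intro st hst _ i hi; exact hst i hi
  | cons a t ih =>
      intro st hst hl
      simp only [pvStk, List.foldl_cons]
      split_ifs with h1 h2 h3
      · exact ih _ (by
          intro i hi
          rcases List.mem_append.mp hi with h | h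
          · exact hst i h
          · simp only [List.mem_singleton] at h
            subst h; exact hl a (by simp))
          (fun p hp => hl p (by simp [hp]))
      · exact ih _ (fun i hi => hst i (List.dropLast_subset _ hi)) (fun p hp => hl p (by simp [hp]))
      · exact ih _ hst (fun p hp => hl p (by simp [hp]))
      · exact ih _ hst (fun p hp => hl p (by simp [hp]))

-- KEY LEMMA: the backward balance scan starting with b pending closers dots exactly the
-- leftover stack minus its top b entries.
theorem rev_scan_eq_stack (o c : Char) (hoc : o ≠ c) (l : List (Int × Char)) :
    (∀ p ∈ l, 0 ≤ p.1) →
    ∀ (b : Nat) (res : List Char),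
      (l.foldr (fun ic acc => pvBRevStep o c acc ic) (b, res)).2
        = ((pvStk o c [] l).take ((pvStk o c [] l).length - b)).foldl pvMark res := by
  have hco : ¬(c = o) := fun h => hoc h.symm
  induction l using List.reverseRecOn with
  | nil => intro _ b res; simp [pvStk]
  | append_singleton t a ih =>
      intro hl b res
      have hta : ∀ p ∈ t, 0 ≤ p.1 := fun p hp => hl p (by simp [hp])
      have ha : 0 ≤ a.1 := hl a (by simp)
      have hS : ∀ i ∈ pvStk o c [] t, 0 ≤ i :=
        stk_nonneg o c t [] (by simp) hta
      set S := pvStk o c [] t with hSdef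
      have hstk : pvStk o c [] (t ++ [a])
          = (if a.2 = o then S ++ [a.1]
             else if a.2 = c then (if S ≠ [] then S.dropLast else S)
             else S) := by
        simp only [pvStk, List.foldl_append]
        rfl
      rw [List.foldr_append]
      simp only [List.foldr_cons, List.foldr_nil]
      by_cases h1 : a.2 = c
      · -- a closer: reverse balance grows, top stack entry protected
        rw [show pvBRevStep o c (b, res) a = (b + 1, res) by
              simp [pvBRevStep, h1]]
        rw [ih hta (b + 1) res, hstk, if_neg (by rw [h1]; exact hco), if_pos h1]
        by_cases hS0 : S = []
        · rw [if_neg (by simpa using hS0)]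
          simp [hS0]
        · rw [if_pos (by simpa using hS0)]
          have htake : S.dropLast.take (S.dropLast.length - b) = S.take (S.length - (b + 1)) := by
            rw [List.dropLast_eq_take, List.take_take, List.length_take]
            congr 1
            have := List.length_pos_iff.mpr hS0
            omega
          rw [htake]
      · by_cases h2 : a.2 = o
        · by_cases hb : b > 0
          · -- opener consumed by a pending closer
            rw [show pvBRevStep o c (b, res) a = (b - 1, res) by
                  simp [pvBRevStep, hoc, h2, hb]]
            rw [ih hta (b - 1) res, hstk, if_pos h2]
            have htake : (S ++ [a.1]).take ((S ++ [a.1]).length - b) = S.take (S.length - (b - 1)) := by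
              rw [List.take_append_of_le_length (by simp; omega)]
              congr 1
              simp only [List.length_append, List.length_cons, List.length_nil]
              omega
            rw [htake]
          · -- unmatched opener: dotted, exactly the new top-of-stack entry
            have hb0 : b = 0 := by omega
            subst hb0
            rw [show pvBRevStep o c (0, res) a = (0, pvMark res a.1) by
                  simp [pvBRevStep, hoc, h2]]
            rw [ih hta 0 (pvMark res a.1), hstk, if_pos h2]
            simp only [Nat.sub_zero, List.take_length]
            rw [List.foldl_append]
            simp only [List.foldl_cons, List.foldl_nil]
            exact foldl_mark_swap S res a.1 hS ha
        · rw [show pvBRevStep o c (b, res) a = (b, res) by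
                simp [pvBRevStep, h1, h2]]
          rw [ih hta b res, hstk, if_neg h2, if_neg h1]

theorem family_eq (o c : Char) (hoc : o ≠ c) (chars : List Char) :
    pvBFamily chars o c = pvAFamily o c chars := by
  have hnn : ∀ p ∈ PySem.List.enumerate chars, 0 ≤ p.1 := by
    intro p hp
    rcases (PySem.List.mem_enumerate_iff _ _ _).mp hp with ⟨k, hk, rfl⟩
    simp
  simp only [pvBFamily, pvAFamily]
  rw [List.foldl_reverse]
  rw [rev_scan_eq_stack o c hoc _ hnn]
  have hfwd := fwd_eq o c (PySem.List.enumerate chars) [] chars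
  simp only [List.length_nil] at hfwd
  rw [hfwd]
  rw [stkA_proj o c (PySem.List.enumerate chars) [] chars]
  simp only [Nat.sub_zero, List.take_length]

theorem fix_eq (structure_ : String) :
    fix_pairing_issues structure_ = fix_pairing_issues_alt structure_ := by
  unfold fix_pairing_issues fix_pairing_issues_alt
  rw [family_eq '(' ')' (by decide), family_eq '<' '>' (by decide)]

-- ===== VERDICT (by name: the statement is the Claim_ definition above) =====
theorem fix_pairing_issues_spec : Claim_equal_fix_pairing_issues := by
  intro s _
  unfold Spec_fix_pairing_issues
  exact fix_eq s
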